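-- pv_equiv track=rewrite | github.com/bespokepunk/bespokebaby2 | enhance_prompts.py | enhance_prompt_with_colors
-- ===== SOURCE A (Python) =====
-- def enhance_prompt_with_colors(prompt_text, colors):
--     """Enhance a prompt with color palette information"""
--     if not colors:
--         return prompt_text
--
--     # Get hex values
--     hex_colors = [c['hex'] for c in colors[:6]]
--     color_list = ", ".join(hex_colors)
--
--     # Insert color information at the beginning of the prompt
--     # Look for the first sentence that describes the scene
--     lines = prompt_text.split('\n')
--     enhanced_lines = []
--
--     for i, line in enumerate(lines):
--         if i == 0 and line.strip():
--             # Add color palette to the first line of the prompt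
--             enhanced_line = line.rstrip('.')
--             enhanced_line += f". **Color palette: {color_list}**. "
--             enhanced_lines.append(enhanced_line)
--         else:
--             enhanced_lines.append(line)
--
--     return '\n'.join(enhanced_lines)
-- ===== SOURCE B (Python) =====
-- def enhance_prompt_with_colors(prompt_text, colors):
--     """Enhance a prompt with color palette information"""
--     if not colors:
--         return prompt_text
--
--     # Build the color list with a running accumulator instead of list-comp + join
--     color_list = ""
--     first = True
--     for c in colors[:6]:
--         if first:
--             color_list = c['hex']
--             first = False
--         else:
--             color_list = color_list + ", " + c['hex']
--
--     # Locate the first newline by scanning characters; split there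
--     for i, ch in enumerate(prompt_text):
--         if ch == '\n':
--             head, rest = prompt_text[:i], prompt_text[i:]
--             break
--     else:
--         head, rest = prompt_text, ""
--
--     if not head.strip():
--         return prompt_text
--
--     return head.rstrip('.') + ". **Color palette: " + color_list + "**. " + rest
-- ===== Notes on version B (the rewrite author's own statement) =====
-- stated objective: alternative
-- what changed: B scans for the first newline and splits the string there (early-returning the prompt unchanged when the first line is blank) and builds the colour list with a running accumulator loop, instead of A's split-into-all-lines, enumerate loop with an accumulator list, re-join, and list-comprehension + str.join.
import Mathlib
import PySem

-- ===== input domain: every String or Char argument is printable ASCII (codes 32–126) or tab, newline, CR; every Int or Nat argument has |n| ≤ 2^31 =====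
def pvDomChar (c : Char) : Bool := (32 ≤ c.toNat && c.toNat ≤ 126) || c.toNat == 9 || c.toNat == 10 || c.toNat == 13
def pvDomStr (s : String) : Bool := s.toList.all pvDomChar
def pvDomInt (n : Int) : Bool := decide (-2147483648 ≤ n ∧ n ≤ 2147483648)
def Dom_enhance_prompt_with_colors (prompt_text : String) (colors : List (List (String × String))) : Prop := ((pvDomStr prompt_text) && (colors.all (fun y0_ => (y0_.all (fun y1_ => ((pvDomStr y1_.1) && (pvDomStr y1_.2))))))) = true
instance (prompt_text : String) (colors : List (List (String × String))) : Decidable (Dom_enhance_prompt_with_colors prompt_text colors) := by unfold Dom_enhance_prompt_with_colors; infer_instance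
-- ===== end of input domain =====

-- B scans once to the first newline and splits there (early-returning the prompt unchanged when
-- the first line is blank) and builds the colour list with an accumulator loop, instead of A's
-- split-all-lines / enumerate-loop / re-join and list-comprehension + join (objective: alternative).

-- shared helper: exact port of Python's line.rstrip('.') (drop trailing '.' characters)
def pvRstripDot (l : List Char) : List Char := (l.reverse.dropWhile (· == '.')).reverse

-- ===== PORT A =====
def enhance_prompt_with_colors (prompt_text : String) (colors : List (List (String × String))) : String :=
  if colors = [] then prompt_text
  else
    let hex_colors := (PySem.List.slice colors none (some 6)).map (fun c => (PySem.Dict.mk c).getD "hex" "")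
    let color_list := PySem.Chars.join ", ".toList (hex_colors.map String.toList)
    let lines := PySem.Chars.splitOn prompt_text.toList ['\n']
    let enhanced_lines := (PySem.List.enumerate lines).foldl (fun acc il =>
      if il.1 = 0 ∧ PySem.Chars.strip il.2 ≠ [] then
        acc ++ [pvRstripDot il.2 ++ (". **Color palette: ".toList ++ color_list ++ "**. ".toList)]
      else acc ++ [il.2]) []
    String.ofList (PySem.Chars.join ['\n'] enhanced_lines)

-- ===== PORT B =====
-- B's `for i, ch in enumerate(prompt_text): if ch == '\n': … break / else: …` scan, transcribed
-- as structural recursion that peels characters until the first '\n' (exact on every input).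
def pvScanNl : List Char → List Char × List Char
  | [] => ([], [])
  | ch :: t =>
    if ch = '\n' then ([], ch :: t)
    else
      let p := pvScanNl t
      (ch :: p.1, p.2)

def enhance_prompt_with_colors_alt (prompt_text : String) (colors : List (List (String × String))) : String :=
  if colors = [] then prompt_text
  else
    -- accumulator loop: color_list = "", first = True; for c in colors[:6]: …
    let st := (PySem.List.slice colors none (some 6)).foldl
      (fun st c =>
        if st.2 then (((PySem.Dict.mk c).getD "hex" "").toList, false)
        else (st.1 ++ ", ".toList ++ ((PySem.Dict.mk c).getD "hex" "").toList, false))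
      (([] : List Char), true)
    let p := pvScanNl prompt_text.toList
    if PySem.Chars.strip p.1 = [] then prompt_text
    else String.ofList
      (pvRstripDot p.1 ++ ". **Color palette: ".toList ++ st.1 ++ "**. ".toList ++ p.2)

-- ===== PRECONDITION & SPEC =====
-- Pre_ excludes exactly the inputs where Python A raises KeyError: some dict among the
-- first six colors lacks the key 'hex' (with colors nonempty); B raises there too.
def Pre_enhance_prompt_with_colors (prompt_text : String) (colors : List (List (String × String))) : Prop :=
  ∀ c ∈ colors.take 6, (PySem.Dict.mk c).contains "hex" = true
instance (prompt_text : String) (colors : List (List (String × String))) : Decidable (Pre_enhance_prompt_with_colors prompt_text colors) := by unfold Pre_enhance_prompt_with_colors; infer_instance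

def pvWitness_enhance_prompt_with_colors : String × (List (List (String × String))) :=
  ("a pixel portrait.\nclean lines", [[("hex", "#ff0000")], [("hex", "#00ff00")]])

def Spec_enhance_prompt_with_colors (prompt_text : String) (colors : List (List (String × String))) (out : String) : Prop := out = enhance_prompt_with_colors_alt prompt_text colors
instance (prompt_text : String) (colors : List (List (String × String))) (out : String) : Decidable (Spec_enhance_prompt_with_colors prompt_text colors out) := by unfold Spec_enhance_prompt_with_colors; infer_instance

-- ===== CLAIM (what is proved, stated in full; the proofs are below) =====
def Claim_equal_enhance_prompt_with_colors : Prop := ∀ (prompt_text : String) (colors : List (List (String × String))), Dom_enhance_prompt_with_colors prompt_text colors → Pre_enhance_prompt_with_colors prompt_text colors → Spec_enhance_prompt_with_colors prompt_text colors (enhance_prompt_with_colors prompt_text colors)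

-- ===== LEMMAS AND PROOFS =====

-- pvScanNl splits at the first newline: takeWhile / dropWhile characterisation
lemma pvScanNl_eq (l : List Char) :
    pvScanNl l = (l.takeWhile (· != '\n'), l.dropWhile (· != '\n')) := by
  induction l with
  | nil => rfl
  | cons a t ih =>
    by_cases h : a = '\n'
    · subst h; simp [pvScanNl, List.takeWhile, List.dropWhile]
    · have h' : (a != '\n') = true := by simp [h]
      simp [pvScanNl, h, ih, List.takeWhile, List.dropWhile, h']

-- the accumulator loop computes the ", "-join
lemma pvFoldJoin_go (xs : List (List Char)) : ∀ acc : List Char,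
    (xs.foldl (fun st h =>
        if st.2 then (h, false) else (st.1 ++ ", ".toList ++ h, false)) (acc, false)).1
      = acc ++ xs.flatMap (fun h => ", ".toList ++ h) := by
  induction xs with
  | nil => intro acc; simp
  | cons x t ih =>
    intro acc
    simp only [List.foldl_cons, Bool.false_eq_true, if_false, List.flatMap_cons]
    rw [ih (acc ++ ", ".toList ++ x)]
    simp

lemma pvJoin_eq_flatMap (x : List Char) (t : List (List Char)) :
    PySem.Chars.join ", ".toList (x :: t) = x ++ t.flatMap (fun h => ", ".toList ++ h) := by
  induction t generalizing x with
  | nil => simp [PySem.Chars.join_singleton]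
  | cons y r ih =>
    rw [PySem.Chars.join_cons_cons, ih y, List.flatMap_cons]
    simp

lemma pvFoldJoin (f : List (String × String) → List Char) (cs : List (List (String × String))) :
    (cs.foldl (fun st c => if st.2 then (f c, false) else (st.1 ++ ", ".toList ++ f c, false))
        (([] : List Char), true)).1
      = PySem.Chars.join ", ".toList (cs.map f) := by
  cases cs with
  | nil => simp
  | cons c t =>
    simp only [List.foldl_cons, if_pos, List.map_cons]
    rw [pvJoin_eq_flatMap]
    have h := pvFoldJoin_go (t.map f) (f c)
    rw [List.foldl_map] at h
    simpa [List.flatMap_map, Function.comp] using h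

-- pure structural characterisation of splitting on a single character
def pvSpl (c : Char) : List Char → List (List Char)
  | [] => [[]]
  | a :: t => if a = c then [] :: pvSpl c t else (pvSpl c t).modifyHead (a :: ·)

lemma pvSpl_cons (c : Char) (l : List Char) :
    ∃ t, pvSpl c l = l.takeWhile (· != c) :: t := by
  induction l with
  | nil => exact ⟨[], rfl⟩
  | cons a rest ih =>
    obtain ⟨t, ht⟩ := ih
    by_cases hac : a = c
    · subst hac
      exact ⟨pvSpl a rest, by simp [pvSpl, List.takeWhile]⟩
    · refine ⟨t, ?_⟩
      have hane : (a != c) = true := by simp [hac]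
      simp [pvSpl, hac, ht, List.modifyHead, List.takeWhile, hane]

lemma pvSpl_go (c : Char) : ∀ (fuel : Nat) (l cur acc : _), l.length ≤ fuel →
    PySem.Chars.splitOn.go [c] fuel l cur acc
      = acc.reverse ++ (pvSpl c l).modifyHead (fun h => cur.reverse ++ h) := by
  intro fuel
  induction fuel with
  | zero =>
    intro l cur acc hl
    have : l = [] := List.length_eq_zero_iff.mp (Nat.le_zero.mp hl)
    subst this
    simp [PySem.Chars.splitOn.go, pvSpl]
  | succ n ih =>
    intro l cur acc hl
    cases l with
    | nil => simp [PySem.Chars.splitOn.go, pvSpl]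
    | cons a rest =>
      rw [PySem.Chars.splitOn.go]
      have hrest : rest.length ≤ n := by simpa using hl
      by_cases hac : a = c
      · subst hac
        have hp : [a].isPrefixOf (a :: rest) = true := by simp [List.isPrefixOf]
        rw [if_pos hp]
        have hdrop : List.drop [a].length (a :: rest) = rest := by simp
        rw [hdrop, ih rest [] (cur.reverse :: acc) hrest]
        obtain ⟨t, ht⟩ := pvSpl_cons a rest
        simp [pvSpl, ht, List.modifyHead]
      · have hp : [c].isPrefixOf (a :: rest) = false := by
          simp [List.isPrefixOf]; exact fun h => absurd h.symm hac
        rw [if_neg (by simp [hp])]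
        rw [ih rest (a :: cur) acc hrest]
        obtain ⟨t, ht⟩ := pvSpl_cons c rest
        simp [pvSpl, hac, ht, List.modifyHead]

lemma splitOn_eq_pvSpl (c : Char) (l : List Char) :
    PySem.Chars.splitOn l [c] = pvSpl c l := by
  unfold PySem.Chars.splitOn
  rw [pvSpl_go c (l.length + 1) l [] [] (by omega)]
  obtain ⟨t, ht⟩ := pvSpl_cons c l
  simp [ht, List.modifyHead]

lemma pvSpl_of_not_mem (c : Char) (l : List Char) (h : ∀ a ∈ l, a ≠ c) :
    pvSpl c l = [l] := by
  induction l with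
  | nil => rfl
  | cons a rest ih =>
    rw [pvSpl, if_neg (h a (by simp))]
    rw [ih (fun a ha => h a (by simp [ha]))]
    rfl

lemma pvSpl_split (c : Char) (hd t : List Char) (h : ∀ a ∈ hd, a ≠ c) :
    pvSpl c (hd ++ c :: t) = hd :: pvSpl c t := by
  induction hd with
  | nil => simp [pvSpl]
  | cons a rest ih =>
    rw [List.cons_append, pvSpl, if_neg (h a (by simp))]
    rw [ih (fun a ha => h a (by simp [ha]))]
    rfl

lemma join_pvSpl (c : Char) (l : List Char) :
    PySem.Chars.join [c] (pvSpl c l) = l := by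
  induction l with
  | nil => simp [pvSpl, PySem.Chars.join_singleton]
  | cons a rest ih =>
    obtain ⟨t, ht⟩ := pvSpl_cons c rest
    rw [ht] at ih
    by_cases hac : a = c
    · subst hac
      simp only [pvSpl, ht, if_true]
      rw [PySem.Chars.join_cons_cons, ih]
      simp
    · simp only [pvSpl, if_neg hac, ht, List.modifyHead]
      cases t with
      | nil =>
        rw [PySem.Chars.join_singleton] at ih ⊢
        rw [ih]
      | cons q r =>
        rw [PySem.Chars.join_cons_cons] at ih ⊢
        simp only [List.cons_append]
        rw [ih]

lemma pvDropWhile_head_false {p : Char → Bool} {l : List Char} {x : Char} {t : List Char}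
    (h : l.dropWhile p = x :: t) : p x = false := by
  induction l with
  | nil => simp at h
  | cons a rest ih =>
    rw [List.dropWhile_cons] at h
    split at h
    · exact ih h
    · rename_i hpa
      cases h
      simpa using hpa

-- the loop over enumerate leaves every line with index ≥ 1 unchanged
lemma pvFoldl_tail (X : List Char) (tl : List (List Char)) :
    ∀ (i0 : Int) (acc : List (List Char)), 1 ≤ i0 →
    (PySem.List.enumerate tl i0).foldl (fun acc il =>
      if il.1 = 0 ∧ PySem.Chars.strip il.2 ≠ [] then acc ++ [pvRstripDot il.2 ++ X]
      else acc ++ [il.2]) acc = acc ++ tl := by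
  induction tl with
  | nil => intro i0 acc h; simp [PySem.List.enumerate]
  | cons x t ih =>
    intro i0 acc h
    rw [PySem.List.enumerate]
    simp only [List.foldl_cons]
    rw [if_neg (by intro hc; omega)]
    rw [ih (i0 + 1) _ (by omega)]
    simp

-- ===== VERDICT (by name: the statement is the Claim_ definition above) =====
theorem enhance_prompt_with_colors_spec : Claim_equal_enhance_prompt_with_colors := by
  intro prompt_text colors _ _
  unfold Spec_enhance_prompt_with_colors
  by_cases hc : colors = []
  · simp [enhance_prompt_with_colors, enhance_prompt_with_colors_alt, hc]
  · simp only [enhance_prompt_with_colors, enhance_prompt_with_colors_alt, if_neg hc]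
    rw [splitOn_eq_pvSpl, pvScanNl_eq,
        pvFoldJoin (fun c => ((PySem.Dict.mk c).getD "hex" "").toList)]
    have hmap : (PySem.List.slice colors none (some 6)).map
        (fun c => ((PySem.Dict.mk c).getD "hex" "").toList)
        = ((PySem.List.slice colors none (some 6)).map
            (fun c => (PySem.Dict.mk c).getD "hex" "")).map String.toList := by
      simp [List.map_map, Function.comp]
    rw [hmap]
    set cs := prompt_text.toList with hcs
    set hd := cs.takeWhile (· != '\n') with hhd
    set CL := PySem.Chars.join ", ".toList
        (((PySem.List.slice colors none (some 6)).map
          (fun c => (PySem.Dict.mk c).getD "hex" "")).map String.toList) with hCL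
    have hmem : ∀ a ∈ hd, a ≠ '\n' := by
      intro a ha
      have := List.mem_takeWhile_imp (by rw [← hhd]; exact ha)
      simpa using this
    rcases hdw : cs.dropWhile (· != '\n') with _ | ⟨x, t⟩
    · -- no newline: a single line
      have hcs_eq : hd = cs := by
        have h1 := List.takeWhile_append_dropWhile (p := (· != '\n')) (l := cs)
        rw [hdw] at h1; simpa [hhd] using h1
      have hone : pvSpl '\n' cs = [hd] := by
        rw [← hcs_eq]
        exact pvSpl_of_not_mem '\n' hd hmem
      rw [hone]
      simp only [PySem.List.enumerate, List.foldl_cons, List.foldl_nil]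
      by_cases hs : PySem.Chars.strip hd = []
      · rw [if_neg (show ¬ (True ∧ PySem.Chars.strip hd ≠ []) by tauto), if_pos hs]
        simp [PySem.Chars.join_singleton, hcs_eq, hcs]
      · rw [if_pos (show True ∧ PySem.Chars.strip hd ≠ [] from ⟨trivial, hs⟩), if_neg hs]
        simp [PySem.Chars.join_singleton]
    · -- newline present: cs = hd ++ '\n' :: t
      have hx : x = '\n' := by simpa using pvDropWhile_head_false hdw
      subst hx
      have hsplit : cs = hd ++ '\n' :: t := by
        have h1 := List.takeWhile_append_dropWhile (p := (· != '\n')) (l := cs)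
        rw [hdw, ← hhd] at h1; exact h1.symm
      have hsp : pvSpl '\n' cs = hd :: pvSpl '\n' t := by
        rw [hsplit]
        exact pvSpl_split '\n' hd t hmem
      rw [hsp, PySem.List.enumerate]
      simp only [List.foldl_cons]
      obtain ⟨t', ht'⟩ := pvSpl_cons '\n' t
      by_cases hs : PySem.Chars.strip hd = []
      · rw [if_neg (show ¬ (True ∧ PySem.Chars.strip hd ≠ []) by tauto), if_pos hs]
        rw [pvFoldl_tail _ _ _ _ (by omega)]
        simp only [List.nil_append, List.singleton_append]
        rw [← hsp, join_pvSpl, hcs]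
        simp
      · rw [if_pos (show True ∧ PySem.Chars.strip hd ≠ [] from ⟨trivial, hs⟩), if_neg hs]
        rw [pvFoldl_tail _ _ _ _ (by omega)]
        simp only [List.nil_append, List.singleton_append]
        rw [ht', PySem.Chars.join_cons_cons, ← ht', join_pvSpl]
        simp
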